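-- pv_equiv track=rewrite | github.com/Patryk404/Tasks | prime/task.py | task
-- ===== SOURCE A (Python) =====
-- import math
--
-- def is_prime(num): # Time Complexity: O(sqrt(n))
--   if num<= 1:
--       return False
--   for i in range(2,int(math.sqrt(num))+1):
--     if (num%i) == 0:
--       return False
--   return True
--
-- def task(tab1,tab2): # Time Complexity: O(n+m)
--     freq = {}
--     tab3 = []
--     for num in tab2:
--         freq[num] = freq.get(num,0) +1
--     for num in tab1:
--         if not is_prime(freq.get(num,0)):
--             tab3.append(num)
--     return tab3
-- ===== SOURCE B (Python) =====
-- def task(tab1, tab2):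
--     freq = {}
--     for num in tab2:
--         freq[num] = freq.get(num, 0) + 1
--     maxf = max(freq.values(), default=0)
--     # sieve table over 0..maxf (every frequency is <= maxf): nonpr[k] iff k is not prime
--     nonpr = [True, True] + [False] * (maxf - 1)
--     for d in range(2, maxf + 1):
--         for q in range(2, maxf // d + 1):
--             nonpr[d * q] = True
--     fget = freq.get
--     return [num for num in tab1 if nonpr[fget(num, 0)]]
-- ===== Notes on version B (the rewrite author's own statement) =====
-- stated objective: alternative
-- what changed: Replaces the per-element trial-division primality test with one sieve-built non-prime table over 0..max(frequency), so the filter pass is a single table lookup per tab1 element; the tab2-counting pass is shared, so overall cost is similar (B wins only on duplicate-heavy inputs).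
import Mathlib
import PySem

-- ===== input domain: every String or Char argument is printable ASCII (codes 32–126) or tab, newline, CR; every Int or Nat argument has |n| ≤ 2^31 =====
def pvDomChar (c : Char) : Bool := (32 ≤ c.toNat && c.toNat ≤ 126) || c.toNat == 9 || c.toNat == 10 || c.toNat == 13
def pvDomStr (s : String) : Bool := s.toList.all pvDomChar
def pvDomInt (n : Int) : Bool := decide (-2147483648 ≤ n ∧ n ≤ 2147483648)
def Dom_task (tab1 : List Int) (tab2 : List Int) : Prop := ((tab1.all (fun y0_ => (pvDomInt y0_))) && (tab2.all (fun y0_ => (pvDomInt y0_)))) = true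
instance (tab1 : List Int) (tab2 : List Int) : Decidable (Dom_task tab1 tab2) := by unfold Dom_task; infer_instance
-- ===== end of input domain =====

-- B replaces A's per-element trial-division primality test with one sieve-built
-- non-prime table over 0..max(frequency); return values are proved equal on all inputs.

-- ===== PORT A =====
-- the 'for i in range(...)' loop of is_prime, with its early 'return False'
def isPrimeLoop (num : Int) : List Int → Bool
  | [] => true
  | i :: rest => if PySem.Int.mod num i == 0 then false else isPrimeLoop num rest

-- int(math.sqrt(num)) ported as Nat.sqrt: exact for 0 ≤ num ≤ 2^31 (double sqrt
-- floors correctly there); the branch num ≤ 1 keeps negative num away from it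
def is_prime (num : Int) : Bool :=
  if num ≤ 1 then false
  else isPrimeLoop num (PySem.List.pyRange 2 ((Nat.sqrt num.toNat : Int) + 1) 1)

def task (tab1 : List Int) (tab2 : List Int) : List Int :=
  let freq := tab2.foldl (fun d num => d.insert num (d.getD num 0 + 1)) (PySem.Dict.empty : PySem.Dict Int Int)
  tab1.foldl (fun tab3 num => if !is_prime (freq.getD num 0) then tab3 ++ [num] else tab3) []

-- ===== PORT B =====
def task_alt (tab1 : List Int) (tab2 : List Int) : List Int :=
  let freq := tab2.foldl (fun d num => d.insert num (d.getD num 0 + 1)) (PySem.Dict.empty : PySem.Dict Int Int)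
  -- max(freq.values(), default=0): a left fold with 0; exact, since every stored value is a positive count
  let maxf : Int := freq.values.foldl max 0
  let nonpr : List Bool := [true, true] ++ List.replicate (maxf - 1).toNat false
  let nonpr := (PySem.List.pyRange 2 (maxf + 1) 1).foldl (fun a d =>
      (PySem.List.pyRange 2 (PySem.Int.floordiv maxf d + 1) 1).foldl
        (fun a q => a.set (d * q).toNat true) a) nonpr
  -- nonpr[fget(num, 0)]: the index is 0 ≤ count ≤ maxf < length nonpr, always in range
  tab1.filter (fun num => nonpr.getD (freq.getD num 0).toNat false)

-- ===== PRECONDITION & SPEC =====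
def Spec_task (tab1 : List Int) (tab2 : List Int) (out : List Int) : Prop := out = task_alt tab1 tab2
instance (tab1 : List Int) (tab2 : List Int) (out : List Int) : Decidable (Spec_task tab1 tab2 out) := by unfold Spec_task; infer_instance

-- ===== CLAIM (what is proved, stated in full; the proofs are below) =====
def Claim_equal_task : Prop := ∀ (tab1 : List Int) (tab2 : List Int), Dom_task tab1 tab2 → Spec_task tab1 tab2 (task tab1 tab2)

-- ===== LEMMAS AND PROOFS =====

-- setting one cell to true
lemma getD_set_true (a : List Bool) (m j : Nat) (hj : j < a.length) :
    (a.set m true).getD j false = (a.getD j false || (m == j)) := by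
  by_cases h : m = j
  · subst h
    simp [List.getD_eq_getElem?_getD, hj]
  · simp [List.getD_eq_getElem?_getD, List.getElem?_set_ne h, h]

-- the inner marking loop
lemma getD_foldl_set_true (qs : List Int) (d : Int) (a : List Bool) (j : Nat)
    (hj : j < a.length) :
    ((qs.foldl (fun a q => a.set (d * q).toNat true) a).getD j false)
      = (a.getD j false || (qs.any (fun q => (d * q).toNat == j))) := by
  induction qs generalizing a with
  | nil => simp
  | cons q rest ih =>
      simp only [List.foldl_cons, List.any_cons]
      rw [ih (a.set (d * q).toNat true) (by simpa using hj), getD_set_true a _ j hj]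
      cases h : ((d * q).toNat == j) <;> simp [Bool.or_assoc]

lemma length_foldl_set_true (qs : List Int) (d : Int) (a : List Bool) :
    (qs.foldl (fun a q => a.set (d * q).toNat true) a).length = a.length := by
  induction qs generalizing a with
  | nil => rfl
  | cons q rest ih => simp [List.foldl_cons, ih]

-- the outer loop
lemma getD_outer (ds : List Int) (n : Int) (a : List Bool) (j : Nat)
    (hj : j < a.length) :
    ((ds.foldl (fun a d =>
        (PySem.List.pyRange 2 (PySem.Int.floordiv n d + 1) 1).foldl
          (fun a q => a.set (d * q).toNat true) a) a).getD j false)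
      = (a.getD j false ||
          (ds.any (fun d => (PySem.List.pyRange 2 (PySem.Int.floordiv n d + 1) 1).any
              (fun q => (d * q).toNat == j)))) := by
  induction ds generalizing a with
  | nil => simp
  | cons d rest ih =>
      simp only [List.foldl_cons, List.any_cons]
      rw [ih _ (by simpa [length_foldl_set_true] using hj), getD_foldl_set_true _ _ _ _ hj]
      cases h : (PySem.List.pyRange 2 (PySem.Int.floordiv n d + 1) 1).any
              (fun q => (d * q).toNat == j) <;> simp [Bool.or_assoc]

-- the initial table
lemma getD_init (n : Int) (hn : 0 ≤ n) (j : Nat) (hj : (j : Int) ≤ n) :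
    (([true, true] ++ List.replicate (n - 1).toNat false).getD j false)
      = decide (j < 2) := by
  match j with
  | 0 => simp
  | 1 => simp
  | (k + 2) =>
      have hk : k < n.toNat - 1 := by omega
      simp [List.getD_eq_getElem?_getD, hk]

lemma length_init (n : Int) (hn : 0 ≤ n) (j : Nat) (hj : (j : Int) ≤ n) :
    j < ([true, true] ++ List.replicate (n - 1).toNat false).length := by
  simp only [List.length_append, List.length_cons, List.length_nil, List.length_replicate]
  omega

-- A's trial-division-- markedness ↔ compositeness, for j ≤ n
lemma marked_iff (n : Int) (j : Nat) (hj : (j : Int) ≤ n) :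
    ((PySem.List.pyRange 2 (n + 1) 1).any (fun d =>
        (PySem.List.pyRange 2 (PySem.Int.floordiv n d + 1) 1).any
          (fun q => (d * q).toNat == j))) = (decide (2 ≤ j) && !decide (Nat.Prime j)) := by
  have hn : 0 ≤ n := le_trans (by positivity) hj
  rw [Bool.eq_iff_iff]
  simp only [List.any_eq_true, PySem.List.mem_pyRange_one, beq_iff_eq, Bool.and_eq_true,
    Bool.not_eq_true', decide_eq_true_eq, decide_eq_false_iff_not]
  constructor
  · rintro ⟨d, ⟨hd2, hdn⟩, q, ⟨hq2, hqn⟩, hj'⟩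
    have hq : q ≤ PySem.Int.floordiv n d := by omega
    rw [PySem.Int.le_floordiv_iff_mul_le (by omega)] at hq
    have h0 : (0:Int) ≤ d * q := by positivity
    have hdq : (j : Int) = d * q := by rw [← hj', Int.toNat_of_nonneg h0]
    refine ⟨by nlinarith, ?_⟩
    intro hp
    have hdvd : d.toNat ∣ j := ⟨q.toNat, by
      have hcast : ((d.toNat * q.toNat : Nat) : Int) = (j : Int) := by
        push_cast
        rw [Int.toNat_of_nonneg (by omega : (0:Int) ≤ d),
          Int.toNat_of_nonneg (by omega : (0:Int) ≤ q)]
        omega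
      exact_mod_cast hcast.symm⟩
    rcases (Nat.Prime.eq_one_or_self_of_dvd hp _ hdvd) with h1 | h1
    · omega
    · have hdj : (j : Int) = d := by omega
      nlinarith
  · rintro ⟨hj2, hnp⟩
    obtain ⟨m, hmdvd, hm2, hmlt⟩ := Nat.exists_dvd_of_not_prime2 hj2 hnp
    obtain ⟨q, hq⟩ := hmdvd
    have hq2 : 2 ≤ q := by nlinarith
    refine ⟨(m : Int), ⟨by exact_mod_cast hm2, by omega⟩,
            (q : Int), ⟨by exact_mod_cast hq2, ?_⟩, by omega⟩
    have : (q : Int) ≤ PySem.Int.floordiv n m := by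
      rw [PySem.Int.le_floordiv_iff_mul_le (by exact_mod_cast (by omega : 0 < m))]
      nlinarith
    omega

-- A's trial-division loop is List.all of non-divisibility
lemma isPrimeLoop_eq_all (num : Int) (l : List Int) :
    isPrimeLoop num l = l.all (fun i => !(PySem.Int.mod num i == 0)) := by
  induction l with
  | nil => rfl
  | cons i rest ih =>
      simp only [isPrimeLoop, List.all_cons, ih]
      cases h : (PySem.Int.mod num i == 0) <;> simp

-- A's is_prime computes Nat primality of the (nonnegative) argument
lemma is_prime_eq (c : Int) (hc : 0 ≤ c) : is_prime c = decide (Nat.Prime c.toNat) := by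
  by_cases h1 : c ≤ 1
  · have : c.toNat = 0 ∨ c.toNat = 1 := by omega
    rcases this with h | h <;> simp [is_prime, h1, h, Nat.not_prime_zero, Nat.not_prime_one]
  · rw [not_le] at h1
    rw [is_prime, if_neg (by omega), isPrimeLoop_eq_all, Bool.eq_iff_iff]
    simp only [List.all_eq_true, PySem.List.mem_pyRange_one, Bool.not_eq_true',
      beq_eq_false_iff_ne, ne_eq, decide_eq_true_eq]
    rw [Nat.prime_def_le_sqrt]
    constructor
    · intro hall
      refine ⟨by omega, fun m hm2 hms hdvd => ?_⟩
      have hne := hall (m : Int) ⟨by exact_mod_cast hm2, by omega⟩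
      apply hne
      rw [PySem.Int.mod_eq_zero_iff_dvd]
      have h := Int.natCast_dvd_natCast.mpr hdvd
      rwa [Int.toNat_of_nonneg hc] at h
    · rintro ⟨-, hnd⟩ i ⟨hi2, his⟩ hmod
      rw [PySem.Int.mod_eq_zero_iff_dvd] at hmod
      have hidvd : i.toNat ∣ c.toNat := by
        have : (i.toNat : Int) ∣ (c.toNat : Int) := by
          rwa [Int.toNat_of_nonneg (by omega), Int.toNat_of_nonneg hc]
        exact_mod_cast this
      exact hnd i.toNat (by omega) (by omega) hidvd

-- the sieve table computes the negation of trial division on every index 0 ≤ c ≤ n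
lemma sieve_eq_not_is_prime (n : Int) (hn : 0 ≤ n) (c : Int) (hc0 : 0 ≤ c) (hcn : c ≤ n) :
    (((PySem.List.pyRange 2 (n + 1) 1).foldl (fun a d =>
        (PySem.List.pyRange 2 (PySem.Int.floordiv n d + 1) 1).foldl
          (fun a q => a.set (d * q).toNat true) a)
        ([true, true] ++ List.replicate (n - 1).toNat false)).getD c.toNat false)
      = !is_prime c := by
  rw [getD_outer _ _ _ _ (length_init n hn c.toNat (by omega)),
    getD_init n hn c.toNat (by omega), marked_iff n c.toNat (by omega),
    is_prime_eq c hc0]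
  by_cases h2 : 2 ≤ c.toNat
  · simp [h2]
    omega
  · have : ¬ Nat.Prime c.toNat := by
      have : c.toNat = 0 ∨ c.toNat = 1 := by omega
      rcases this with h | h <;> simp [h, Nat.not_prime_zero, Nat.not_prime_one]
    simp [h2, this]
    omega

-- bounds for the fold computing max(freq.values(), default=0)
lemma init_le_foldl_max (l : List Int) (a : Int) : a ≤ l.foldl max a := by
  induction l generalizing a with
  | nil => simp
  | cons x xs ih => exact le_trans (le_max_left a x) (ih (max a x))

lemma le_foldl_max (l : List Int) (a x : Int) (hx : x ∈ l) : x ≤ l.foldl max a := by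
  induction l generalizing a with
  | nil => simp at hx
  | cons y ys ih =>
      rcases List.mem_cons.mp hx with h | h
      · subst h
        exact le_trans (le_max_right a x) (init_le_foldl_max ys (max a x))
      · exact ih (max a y) h

-- every frequency is bounded by the fold of the counter's values
lemma count_le_values_max (tab2 : List Int) (num : Int) :
    (tab2.count num : Int) ≤ (PySem.Dict.counter tab2).values.foldl max 0 := by
  by_cases hmem : num ∈ tab2
  · apply le_foldl_max
    simp only [PySem.Dict.values, PySem.Dict.items_counter, List.map_map]
    exact List.mem_map.mpr ⟨num, by simpa [PySem.Set.mem_ofList] using hmem, rfl⟩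
  · rw [List.count_eq_zero.mpr hmem]
    exact_mod_cast init_le_foldl_max _ 0

-- A's append loop-- A's append loop is a filter
lemma foldl_filter {a : Type} (p : a → Bool) (l : List a) (acc : List a) :
    l.foldl (fun t x => if p x then t ++ [x] else t) acc = acc ++ l.filter p := by
  induction l generalizing acc with
  | nil => simp
  | cons x xs ih => by_cases h : p x <;> simp [h, ih]

-- ===== VERDICT (by name: the statement is the Claim_ definition above) =====
theorem task_spec : Claim_equal_task := by
  intro tab1 tab2 _
  show task tab1 tab2 = task_alt tab1 tab2
  unfold task task_alt
  rw [foldl_filter, List.nil_append]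
  apply List.filter_congr
  intro num _
  rw [PySem.Dict.foldl_insert_getD_add_one_eq_counter, PySem.Dict.getD_counter,
    sieve_eq_not_is_prime ((PySem.Dict.counter tab2).values.foldl max 0)
      (init_le_foldl_max _ 0) (tab2.count num : Int)
      (by positivity) (count_le_values_max tab2 num)]
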